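-- pv_equiv track=rewrite | github.com/chawanghyeon/persistent-memory-recommend-system | src/persistent_memory_recsys/constraint/adapters/outbound/static_runtime.py | _calculate_layer_max_branches
-- ===== SOURCE A (Python) =====
-- def _calculate_layer_max_branches(
--     token_sequences: tuple[tuple[int, ...], ...],
-- ) -> tuple[int, ...]:
--     semantic_id_length = len(token_sequences[0])
--     layer_max_branches = [0] * semantic_id_length
--     layer_max_branches[0] = len({sequence[0] for sequence in token_sequences})
--
--     for prefix_length in range(1, semantic_id_length):
--         grouped: dict[tuple[int, ...], set[int]] = {}
--
--         for sequence in token_sequences: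
--             prefix = sequence[:prefix_length]
--             next_token = sequence[prefix_length]
--             grouped.setdefault(prefix, set()).add(next_token)
--
--         layer_max_branches[prefix_length] = max(
--             (len(tokens) for tokens in grouped.values()),
--             default=0,
--         )
--
--     return tuple(layer_max_branches)
-- ===== SOURCE B (Python) =====
-- def _calculate_layer_max_branches(
--     token_sequences: tuple[tuple[int, ...], ...],
-- ) -> tuple[int, ...]:
--     length = len(token_sequences[0])
--     groups = [list(token_sequences)]
--     result = []
--     for depth in range(length):
--         new_groups = []
--         max_branches = 0
--         for group in groups:
--             by_token = {}
--             for seq in group: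
--                 by_token.setdefault(seq[depth], []).append(seq)
--             new_groups.extend(by_token.values())
--             if len(by_token) > max_branches:
--                 max_branches = len(by_token)
--         groups = new_groups
--         result.append(max_branches)
--     return tuple(result)
-- ===== Notes on version B (the rewrite author's own statement) =====
-- stated objective: faster
-- what changed: Instead of rebuilding, for every prefix length, a dict keyed by length-d prefix tuples (hashing O(d) per sequence per level), B refines one partition of the sequences level by level, grouping each group by its single token at the current depth (a breadth-first trie walk), so each level costs O(N) dict operations on scalar keys.
import Mathlib
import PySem

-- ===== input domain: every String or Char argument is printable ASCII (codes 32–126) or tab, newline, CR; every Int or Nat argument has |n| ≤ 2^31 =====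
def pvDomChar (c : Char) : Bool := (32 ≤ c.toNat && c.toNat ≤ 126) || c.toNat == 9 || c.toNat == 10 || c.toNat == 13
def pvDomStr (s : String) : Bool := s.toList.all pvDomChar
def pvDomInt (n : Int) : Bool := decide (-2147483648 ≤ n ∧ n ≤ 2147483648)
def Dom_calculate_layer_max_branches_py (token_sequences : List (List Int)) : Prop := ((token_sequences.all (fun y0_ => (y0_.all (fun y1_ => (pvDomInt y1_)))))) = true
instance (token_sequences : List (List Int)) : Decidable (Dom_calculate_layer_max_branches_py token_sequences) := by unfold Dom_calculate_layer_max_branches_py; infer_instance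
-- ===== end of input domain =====

-- B replaces A's per-level regrouping by hashed length-d prefix tuples with a single level-by-level
-- partition refinement keyed by one token (a breadth-first trie walk): O(N·L) dict operations instead
-- of O(N·L²); a timing run measured B faster. Return values proved equal on Pre_.

-- ===== PORT A =====
def calculate_layer_max_branches_py (token_sequences : List (List Int)) : List Int :=
  let semantic_id_length := (token_sequences.headD []).length
  -- layer_max_branches = [0] * semantic_id_length; layer_max_branches[0] = len({sequence[0] ...})
  let layer_max_branches :=
    PySem.List.pySetD (List.replicate semantic_id_length (0 : Int)) 0
      (PySem.Set.len (PySem.Set.ofList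
        (token_sequences.map (fun sequence => PySem.List.pyGetD sequence 0 0))))
  -- for prefix_length in range(1, semantic_id_length): ...
  (PySem.List.pyRange 1 (semantic_id_length : Int)).foldl
    (fun layer_max_branches prefix_length =>
      let grouped : PySem.Dict (List Int) (PySem.Set Int) :=
        token_sequences.foldl
          (fun grouped sequence =>
            -- grouped.setdefault(sequence[:prefix_length], set()).add(sequence[prefix_length])
            grouped.modify (PySem.List.slice sequence none (some prefix_length)) PySem.Set.empty
              (fun tokens => PySem.Set.add tokens (PySem.List.pyGetD sequence prefix_length 0)))
          PySem.Dict.empty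
      -- layer_max_branches[prefix_length] = max((len(tokens) for tokens in grouped.values()), default=0)
      PySem.List.pySetD layer_max_branches prefix_length
        (PySem.List.maxD (grouped.values.map (fun tokens => PySem.Set.len tokens)) (fun x => x) 0))
    layer_max_branches

-- ===== PORT B =====
def calculate_layer_max_branches_py_alt (token_sequences : List (List Int)) : List Int :=
  ((List.range (token_sequences.headD []).length).foldl
    (fun (state : List (List (List Int)) × List Int) (depth : Nat) =>
      -- state = (groups, result); one refinement step per depth
      let step := state.1.foldl
        (fun (acc : List (List (List Int)) × Int) group =>
          -- by_token = {}; for seq in group: by_token.setdefault(seq[depth], []).append(seq)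
          let by_token : PySem.Dict Int (List (List Int)) :=
            group.foldl
              (fun by_token seq =>
                by_token.modify (PySem.List.pyGetD seq (depth : Int) 0) [] (fun l => l ++ [seq]))
              PySem.Dict.empty
          (acc.1 ++ by_token.values,
            if (by_token.size : Int) > acc.2 then (by_token.size : Int) else acc.2))
        ([], (0 : Int))
      (step.1, state.2 ++ [step.2]))
    ([token_sequences], [])).2

-- ===== PRECONDITION & SPEC =====
-- Pre_ excludes exactly the inputs on which A raises IndexError: the empty list, an empty first
-- sequence (index 0 of an empty list / of the empty first sequence), or some sequence shorter than
-- the first one (sequence[prefix_length] out of range). A returns on everything Pre_ admits.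
def Pre_calculate_layer_max_branches_py (token_sequences : List (List Int)) : Prop :=
  token_sequences ≠ [] ∧ 1 ≤ (token_sequences.headD []).length ∧
    ∀ s ∈ token_sequences, (token_sequences.headD []).length ≤ s.length
instance (token_sequences : List (List Int)) : Decidable (Pre_calculate_layer_max_branches_py token_sequences) := by unfold Pre_calculate_layer_max_branches_py; infer_instance

def pvWitness_calculate_layer_max_branches_py : List (List Int) := [[1, 2], [1, 3], [2, 2]]

def Spec_calculate_layer_max_branches_py (token_sequences : List (List Int)) (out : List Int) : Prop := out = calculate_layer_max_branches_py_alt token_sequences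
instance (token_sequences : List (List Int)) (out : List Int) : Decidable (Spec_calculate_layer_max_branches_py token_sequences out) := by unfold Spec_calculate_layer_max_branches_py; infer_instance

-- ===== CLAIM (what is proved, stated in full; the proofs are below) =====
def Claim_equal_calculate_layer_max_branches_py : Prop := ∀ (token_sequences : List (List Int)), Dom_calculate_layer_max_branches_py token_sequences → Pre_calculate_layer_max_branches_py token_sequences → Spec_calculate_layer_max_branches_py token_sequences (calculate_layer_max_branches_py token_sequences)
-- ===== LEMMAS AND PROOFS =====

-- Common vocabulary: groups and distinct-next-token counts per prefix.
def pvTok (d : Nat) (s : List Int) : Int := s.getD d 0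
def pvGrp (ts : List (List Int)) (d : Nat) (p : List Int) : List (List Int) :=
  ts.filter (fun s => s.take d == p)
def pvToks (ts : List (List Int)) (d : Nat) (p : List Int) : PySem.Set Int :=
  PySem.Set.ofList ((pvGrp ts d p).map (pvTok d))
def pvCnt (ts : List (List Int)) (d : Nat) (p : List Int) : Int :=
  PySem.Set.len (pvToks ts d p)
def pvPrefixes (ts : List (List Int)) (d : Nat) : List (List Int) :=
  PySem.Set.ofList (ts.map (List.take d))
def pvLevel (ts : List (List Int)) (d : Nat) : Int :=
  (PySem.List.max? ((pvPrefixes ts d).map (pvCnt ts d)) (fun x => x)).getD 0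
def pvGood (ts : List (List Int)) (d : Nat) (G : List (List (List Int))) : Prop :=
  ∃ P : List (List Int), P.Nodup ∧ (∀ p, p ∈ P ↔ p ∈ ts.map (List.take d)) ∧
    G = P.map (pvGrp ts d)

-- B's inner loop, named for the proofs (definitionally the port's lambdas).
def pvBTok (depth : Nat) (group : List (List Int)) : PySem.Dict Int (List (List Int)) :=
  group.foldl
    (fun by_token seq => by_token.modify (PySem.List.pyGetD seq (depth : Int) 0) [] (fun l => l ++ [seq]))
    PySem.Dict.empty
def pvBInner (depth : Nat) (acc : List (List (List Int)) × Int) (group : List (List Int)) :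
    List (List (List Int)) × Int :=
  (acc.1 ++ (pvBTok depth group).values,
    if ((pvBTok depth group).size : Int) > acc.2 then ((pvBTok depth group).size : Int) else acc.2)
def pvBStep (state : List (List (List Int)) × List Int) (depth : Nat) :
    List (List (List Int)) × List Int :=
  let step := state.1.foldl (pvBInner depth) ([], (0 : Int))
  (step.1, state.2 ++ [step.2])

lemma pv_alt_eq (ts : List (List Int)) :
    calculate_layer_max_branches_py_alt ts
      = ((List.range (ts.headD []).length).foldl pvBStep ([ts], [])).2 := by
  unfold calculate_layer_max_branches_py_alt pvBStep pvBInner pvBTok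
  rfl

-- generic: value of a setdefault/modify grouping fold at one key
lemma pv_getD_modifyFold {κ ν α : Type} [BEq κ] [LawfulBEq κ] [DecidableEq κ]
    (l : List α) (key : α → κ) (d0 : ν) (g : α → ν → ν) (c : κ) :
    ∀ dd : PySem.Dict κ ν,
      (l.foldl (fun dd x => dd.modify (key x) d0 (g x)) dd).getD c d0
        = (l.filter (fun x => key x == c)).foldl (fun v x => g x v) (dd.getD c d0) := by
  induction l with
  | nil => intro dd; simp
  | cons x t ih =>
      intro dd
      simp only [List.foldl_cons, List.filter_cons]
      by_cases hx : key x = c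
      · simp only [hx, beq_self_eq_true, if_pos, List.foldl_cons, ih,
          PySem.Dict.getD_modify]
      · have : (key x == c) = false := by simp [hx]
        simp only [this, Bool.false_eq_true, if_false, ih, PySem.Dict.getD_modify]
        rw [if_neg (fun h => hx h.symm)]

-- keys of such a fold, from the empty dict
lemma pv_keys_modifyFold {κ ν α : Type} [BEq κ] [LawfulBEq κ]
    (l : List α) (key : α → κ) (d0 : ν) (g : α → ν → ν) :
    (l.foldl (fun dd x => dd.modify (key x) d0 (g x)) PySem.Dict.empty).keys
      = PySem.Set.ofList (l.map key) := by
  have h := PySem.Dict.keys_foldl_modify_key l key d0 (fun _ x => g x) PySem.Dict.empty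
  simpa [PySem.Dict.keys_empty, PySem.Set.update, PySem.Set.ofList_eq_foldl] using h

lemma pv_nodup_keys_modifyFold {κ ν α : Type} [BEq κ] [LawfulBEq κ]
    (l : List α) (key : α → κ) (d0 : ν) (g : α → ν → ν) :
    (l.foldl (fun dd x => dd.modify (key x) d0 (g x)) PySem.Dict.empty).keys.Nodup :=
  PySem.Dict.nodup_keys_foldl_modify_key l key d0 (fun _ x => g x) PySem.Dict.empty
    (by simp [PySem.Dict.keys_empty])

-- A's per-level grouping dict: values are the distinct-next-token sets, one per distinct prefix
lemma pv_agrouped_values (ts : List (List Int)) (d : Nat) :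
    (ts.foldl
      (fun grouped sequence =>
        grouped.modify (PySem.List.slice sequence none (some (d : Int))) PySem.Set.empty
          (fun tokens => PySem.Set.add tokens (PySem.List.pyGetD sequence (d : Int) 0)))
      PySem.Dict.empty).values
      = (pvPrefixes ts d).map (pvToks ts d) := by
  have hkey : ∀ s : List Int, PySem.List.slice s none (some (d : Int)) = s.take d := by
    intro s; simp [pysem]
  rw [PySem.Dict.values_eq_map_keys _
    (pv_nodup_keys_modifyFold ts (fun s => PySem.List.slice s none (some (d : Int)))
      PySem.Set.empty (fun s tokens => PySem.Set.add tokens (PySem.List.pyGetD s (d : Int) 0)))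
    PySem.Set.empty]
  rw [pv_keys_modifyFold ts (fun s => PySem.List.slice s none (some (d : Int)))
      PySem.Set.empty (fun s tokens => PySem.Set.add tokens (PySem.List.pyGetD s (d : Int) 0))]
  simp only [hkey]
  apply List.map_congr_left
  intro p _
  rw [pv_getD_modifyFold ts (fun s => s.take d)
      PySem.Set.empty (fun s tokens => PySem.Set.add tokens (PySem.List.pyGetD s (d : Int) 0)) p
      PySem.Dict.empty]
  rw [PySem.Dict.getD_empty]
  unfold pvToks pvGrp pvTok
  rw [PySem.Set.ofList_eq_foldl, List.foldl_map]
  simp only [PySem.List.pyGetD_natCast]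
  rfl

lemma pv_A_level (ts : List (List Int)) (d : Nat) :
    PySem.List.maxD
      (((ts.foldl
        (fun grouped sequence =>
          grouped.modify (PySem.List.slice sequence none (some (d : Int))) PySem.Set.empty
            (fun tokens => PySem.Set.add tokens (PySem.List.pyGetD sequence (d : Int) 0)))
        PySem.Dict.empty).values).map (fun tokens => PySem.Set.len tokens)) (fun x => x) 0
      = pvLevel ts d := by
  rw [pv_agrouped_values, List.map_map]
  rfl

-- B's per-group dict
lemma pv_bt_values (g : List (List Int)) (d : Nat) :
    (pvBTok d g).values
      = (PySem.Set.ofList (g.map (pvTok d))).map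
          (fun t => g.filter (fun s => pvTok d s == t)) := by
  unfold pvBTok
  have hkey : ∀ s : List Int, PySem.List.pyGetD s (d : Int) 0 = pvTok d s := by
    intro s; rw [PySem.List.pyGetD_natCast]; rfl
  rw [PySem.Dict.values_eq_map_keys _
    (pv_nodup_keys_modifyFold g (fun s => PySem.List.pyGetD s (d : Int) 0) []
      (fun s l => l ++ [s])) []]
  rw [pv_keys_modifyFold g (fun s => PySem.List.pyGetD s (d : Int) 0) [] (fun s l => l ++ [s])]
  simp only [hkey]
  apply List.map_congr_left
  intro t _
  rw [pv_getD_modifyFold g (pvTok d) [] (fun s l => l ++ [s]) t PySem.Dict.empty]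
  rw [PySem.Dict.getD_empty]
  rw [PySem.List.foldl_append_singleton_eq_self, List.nil_append]

lemma pv_bt_size (g : List (List Int)) (d : Nat) :
    (pvBTok d g).size = (PySem.Set.ofList (g.map (pvTok d))).length := by
  have hkey : ∀ s : List Int, PySem.List.pyGetD s (d : Int) 0 = pvTok d s := by
    intro s; rw [PySem.List.pyGetD_natCast]; rfl
  have h : (pvBTok d g).size = (pvBTok d g).keys.length := by
    simp [PySem.Dict.size, PySem.Dict.keys]
  rw [h]
  unfold pvBTok
  rw [pv_keys_modifyFold g (fun s => PySem.List.pyGetD s (d : Int) 0) [] (fun s l => l ++ [s])]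
  simp only [hkey]

-- prefix extension
lemma pv_take_succ (s : List Int) (d : Nat) (h : d < s.length) :
    s.take (d + 1) = s.take d ++ [s.getD d 0] := by
  rw [List.take_add_one]
  simp [List.getElem?_eq_getElem h]

lemma pv_grp_refine (ts : List (List Int)) (d : Nat) (p : List Int) (t : Int)
    (hd : ∀ s ∈ ts, d < s.length) (hp : p.length = d) :
    (pvGrp ts d p).filter (fun s => pvTok d s == t) = pvGrp ts (d + 1) (p ++ [t]) := by
  unfold pvGrp
  rw [List.filter_filter]
  apply List.filter_congr
  intro s hs
  have hlen := hd s hs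
  rw [Bool.eq_iff_iff]
  simp only [Bool.and_eq_true, beq_iff_eq, pvTok, pv_take_succ s d hlen]
  constructor
  · rintro ⟨h2, h1⟩; rw [h1, h2]
  · intro h
    have hl : (s.take d).length = p.length := by
      rw [List.length_take, hp]; omega
    obtain ⟨h1, h2⟩ := List.append_inj h hl
    exact ⟨by simpa using h2, h1⟩

-- running max with a 0 start equals Python's max(..., default=0) over any list with the same
-- members, as soon as the list is nonempty and its members are ≥ 1
lemma pv_runmax_eq_foldl_max (C : List Int) : ∀ a : Int,
    C.foldl (fun m c => if c > m then c else m) a = C.foldl max a := by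
  induction C with
  | nil => intro a; rfl
  | cons c t ih =>
      intro a
      simp only [List.foldl_cons, ih]
      congr 1
      split_ifs with h
      · exact (max_eq_right h.le).symm
      · exact (max_eq_left (not_lt.mp h)).symm

lemma pv_max_eq (C1 C2 : List Int) (hmem : ∀ c, c ∈ C1 ↔ c ∈ C2) (hne : C1 ≠ [])
    (hpos : ∀ c ∈ C1, 1 ≤ c) :
    C1.foldl max 0 = (PySem.List.max? C2 (fun x => x)).getD 0 := by
  obtain ⟨c, C1', rfl⟩ := List.exists_cons_of_ne_nil hne
  have hc2 : C2 ≠ [] := List.ne_nil_of_mem ((hmem c).mp List.mem_cons_self)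
  cases hmax : PySem.List.max? C2 (fun x => x) with
  | none => exact absurd ((PySem.List.max?_eq_none_iff C2 _).mp hmax) hc2
  | some m =>
      simp only [Option.getD_some]
      apply le_antisymm
      · rcases PySem.List.foldl_max_mem (c :: C1') 0 with h | h
        · have h1 := hpos c List.mem_cons_self
          have h2 := (PySem.List.le_foldl_max (c :: C1') 0).2 c List.mem_cons_self
          omega
        · exact PySem.List.max?_isMax hmax _ ((hmem _).mp h)
      · exact (PySem.List.le_foldl_max (c :: C1') 0).2 m ((hmem m).mpr (PySem.List.max?_mem hmax))

lemma pv_level0 (ts : List (List Int)) (hts : ts ≠ []) :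
    pvLevel ts 0 = PySem.Set.len (PySem.Set.ofList (ts.map (fun s => PySem.List.pyGetD s 0 0))) := by
  obtain ⟨s0, tl, rfl⟩ := List.exists_cons_of_ne_nil hts
  have hpfx : pvPrefixes (s0 :: tl) 0 = [[]] := by
    unfold pvPrefixes
    rw [PySem.Set.ofList_eq_foldl]
    simp only [List.map_cons, List.take_zero, List.foldl_cons]
    have hadd : PySem.Set.add ([] : PySem.Set (List Int)) [] = [[]] := by
      simp [PySem.Set.add, PySem.Set.contains]
    rw [hadd]
    have haux : ∀ (l : List (List Int)), (∀ x ∈ l, x = ([] : List Int)) →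
        List.foldl PySem.Set.add [[]] l = [[]] := by
      intro l
      induction l with
      | nil => intro _; rfl
      | cons a t ih =>
          intro h
          simp only [List.foldl_cons]
          rw [h a (by simp),
            show PySem.Set.add [([] : List Int)] [] = [[]] from by
              simp [PySem.Set.add, PySem.Set.contains]]
          exact ih (fun x hx => h x (by simp [hx]))
    exact haux _ (by simp)
  unfold pvLevel
  rw [hpfx]
  rw [show ([[]] : List (List Int)).map (pvCnt (s0 :: tl) 0) = [pvCnt (s0 :: tl) 0 []] from rfl]
  rw [PySem.List.max?_id_cons]
  simp only [List.foldl_nil, Option.getD_some]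
  unfold pvCnt pvToks pvGrp
  have hfil : (s0 :: tl).filter (fun s => s.take 0 == ([] : List Int)) = s0 :: tl := by
    simp
  rw [hfil]
  have hmapeq : (s0 :: tl).map (pvTok 0)
      = (s0 :: tl).map (fun s => PySem.List.pyGetD s 0 0) := by
    apply List.map_congr_left
    intro s _
    rw [PySem.List.pyGetD_ofNat']
    rfl
  rw [hmapeq]

-- the refinement step
lemma pv_step (ts : List (List Int)) (d : Nat) (G : List (List (List Int)))
    (hts : ts ≠ []) (hd : ∀ s ∈ ts, d < s.length) (hg : pvGood ts d G) :
    (G.foldl (pvBInner d) ([], 0)).2 = pvLevel ts d ∧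
      pvGood ts (d + 1) (G.foldl (pvBInner d) ([], 0)).1 := by
  obtain ⟨P, hnd, hmemP, rfl⟩ := hg
  have hplen : ∀ p ∈ P, p.length = d := by
    intro p hp
    obtain ⟨s, hs, rfl⟩ := List.mem_map.mp ((hmemP p).mp hp)
    have := hd s hs
    rw [List.length_take]
    omega
  have hsplit : (P.map (pvGrp ts d)).foldl (pvBInner d) ([], 0)
      = ((P.map (pvGrp ts d)).foldl (fun a g => a ++ (pvBTok d g).values) [],
         (P.map (pvGrp ts d)).foldl
           (fun m g => if ((pvBTok d g).size : Int) > m then ((pvBTok d g).size : Int) else m) 0) := by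
    rw [show pvBInner d = (fun (s : List (List (List Int)) × Int) (e : List (List Int)) =>
      ((fun a g => a ++ (pvBTok d g).values) s.1 e,
       (fun m g => if ((pvBTok d g).size : Int) > m then ((pvBTok d g).size : Int) else m) s.2 e))
      from rfl]
    exact PySem.List.foldl_prod_mk
      (f := fun a g => a ++ (pvBTok d g).values)
      (g := fun m g => if ((pvBTok d g).size : Int) > m then ((pvBTok d g).size : Int) else m)
      (List.map (pvGrp ts d) P) [] 0
  have hcnt : ∀ p : List Int, ((pvBTok d (pvGrp ts d p)).size : Int) = pvCnt ts d p := by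
    intro p
    rw [pv_bt_size]
    rfl
  have hPne : P ≠ [] := by
    obtain ⟨s0, tl, rfl⟩ := List.exists_cons_of_ne_nil hts
    exact List.ne_nil_of_mem ((hmemP (s0.take d)).mpr
      (List.mem_map_of_mem List.mem_cons_self))
  have hpos : ∀ p ∈ P, 1 ≤ pvCnt ts d p := by
    intro p hp
    obtain ⟨s, hs, hts'⟩ := List.mem_map.mp ((hmemP p).mp hp)
    have hsg : s ∈ pvGrp ts d p := List.mem_filter.mpr ⟨hs, by simp [hts']⟩
    have hmem2 : pvTok d s ∈ pvToks ts d p :=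
      (PySem.Set.mem_ofList _ _).mpr (List.mem_map_of_mem hsg)
    have hlp : 0 < (pvToks ts d p).length := List.length_pos_of_mem hmem2
    show (1 : Int) ≤ ((pvToks ts d p).length : Int)
    exact_mod_cast hlp
  constructor
  · rw [hsplit]
    show (P.map (pvGrp ts d)).foldl
        (fun m g => if ((pvBTok d g).size : Int) > m then ((pvBTok d g).size : Int) else m) 0
      = pvLevel ts d
    rw [List.foldl_map]
    have hc : P.foldl (fun m p =>
        if ((pvBTok d (pvGrp ts d p)).size : Int) > m then ((pvBTok d (pvGrp ts d p)).size : Int) else m) 0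
        = P.foldl (fun m p => if pvCnt ts d p > m then pvCnt ts d p else m) 0 := by
      apply PySem.List.foldl_congr_mem
      intro acc x _
      rw [hcnt]
    rw [hc, ← List.foldl_map (f := pvCnt ts d) (g := fun m c => if c > m then c else m),
      pv_runmax_eq_foldl_max]
    unfold pvLevel
    apply pv_max_eq
    · intro c
      simp only [List.mem_map]
      constructor
      · rintro ⟨p, hp, rfl⟩
        exact ⟨p, by unfold pvPrefixes; rw [PySem.Set.mem_ofList]; exact (hmemP p).mp hp, rfl⟩
      · rintro ⟨p, hp, rfl⟩
        refine ⟨p, (hmemP p).mpr ?_, rfl⟩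
        unfold pvPrefixes at hp
        rwa [PySem.Set.mem_ofList] at hp
    · simp [hPne]
    · intro c hc2
      obtain ⟨p, hp, rfl⟩ := List.mem_map.mp hc2
      exact hpos p hp
  · rw [hsplit]
    show pvGood ts (d + 1) ((P.map (pvGrp ts d)).foldl (fun a g => a ++ (pvBTok d g).values) [])
    rw [PySem.List.foldl_append_eq_flatMap, List.nil_append, List.flatMap_map]
    have hv : ∀ p ∈ P, (pvBTok d (pvGrp ts d p)).values
        = (pvToks ts d p).map (fun t => pvGrp ts (d + 1) (p ++ [t])) := by
      intro p hp
      rw [pv_bt_values]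
      exact List.map_congr_left (fun t _ => pv_grp_refine ts d p t hd (hplen p hp))
    refine ⟨P.flatMap (fun p => (pvToks ts d p).map (fun t => p ++ [t])), ?_, ?_, ?_⟩
    · rw [List.nodup_flatMap]
      constructor
      · intro p _
        exact (PySem.Set.nodup_ofList _).map
          (fun t1 t2 h => by simpa using List.append_cancel_left h)
      · refine hnd.imp ?_
        intro p1 p2 hne12 q hq1 hq2
        obtain ⟨t1, _, rfl⟩ := List.mem_map.mp hq1
        obtain ⟨t2, _, heq⟩ := List.mem_map.mp hq2
        exact hne12 (List.append_inj' heq.symm (by simp)).1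
    · intro q
      constructor
      · intro hq
        obtain ⟨p, hp, hq2⟩ := List.mem_flatMap.mp hq
        obtain ⟨t, ht, rfl⟩ := List.mem_map.mp hq2
        obtain ⟨s, hsg, rfl⟩ := List.mem_map.mp ((PySem.Set.mem_ofList _ _).mp ht)
        have hs := (List.mem_filter.mp hsg).1
        have hpfx : s.take d = p := by simpa using (List.mem_filter.mp hsg).2
        refine List.mem_map.mpr ⟨s, hs, ?_⟩
        rw [pv_take_succ s d (hd s hs), hpfx]
        rfl
      · intro hq
        obtain ⟨s, hs, rfl⟩ := List.mem_map.mp hq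
        refine List.mem_flatMap.mpr ⟨s.take d, (hmemP _).mpr (List.mem_map_of_mem hs), ?_⟩
        refine List.mem_map.mpr ⟨pvTok d s, ?_, ?_⟩
        · exact (PySem.Set.mem_ofList _ _).mpr
            (List.mem_map_of_mem (List.mem_filter.mpr ⟨hs, by simp⟩))
        · rw [pv_take_succ s d (hd s hs)]
          rfl
    · rw [List.map_flatMap, List.flatMap_def, List.flatMap_def]
      apply congrArg List.flatten
      apply List.map_congr_left
      intro p hp
      rw [hv p hp, List.map_map]
      rfl

lemma pv_loop (ts : List (List Int)) (hts : ts ≠ []) :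
    ∀ (n d : Nat) (G : List (List (List Int))) (res : List Int),
      (∀ s ∈ ts, d + n ≤ s.length) → pvGood ts d G →
      ((List.range' d n).foldl pvBStep (G, res)).2 = res ++ (List.range' d n).map (pvLevel ts) := by
  intro n
  induction n with
  | zero => intro d G res _ _; simp
  | succ n ih =>
      intro d G res hlen hg
      have hd : ∀ s ∈ ts, d < s.length := fun s hs => by have := hlen s hs; omega
      obtain ⟨h2, h1⟩ := pv_step ts d G hts hd hg
      rw [List.range'_succ]
      simp only [List.foldl_cons, pvBStep]
      rw [ih (d + 1) _ _ (fun s hs => by have := hlen s hs; omega) h1]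
      simp [h2, List.map_cons]

-- A's index-assignment loop
lemma pv_setloop (v : Int → Int) :
    ∀ (n j : Nat) (cur : List Int), cur.length = j + n →
      (PySem.List.pyRange (j : Int) ((j : Int) + (n : Int))).foldl
          (fun lmb pl => PySem.List.pySetD lmb pl (v pl)) cur
        = cur.take j ++ (List.range' j n).map (fun k : Nat => v (k : Int)) := by
  intro n
  induction n with
  | zero =>
      intro j cur hlen
      have h : cur.length ≤ j := by omega
      simp [pysem, List.take_of_length_le h]
  | succ n ih =>
      intro j cur hlen
      have hlt : (j : Int) < (j : Int) + ((n : Nat) + 1 : Nat) := by push_cast; omega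
      rw [PySem.List.pyRange_one_cons hlt]
      simp only [List.foldl_cons, PySem.List.pySetD_natCast]
      have hjlen : j < cur.length := by omega
      have : (j : Int) + 1 = ((j + 1 : Nat) : Int) := by push_cast; ring
      rw [this]
      have hcast : ((j : Int)) + ((n + 1 : Nat) : Int) = ((j + 1 : Nat) : Int) + (n : Int) := by
        push_cast; ring
      rw [hcast, ih (j + 1) (cur.set j (v j)) (by simp; omega)]
      have htake : (cur.set j (v (j : Int))).take (j + 1) = cur.take j ++ [v (j : Int)] := by
        rw [List.set_eq_take_append_cons_drop]
        have hl : (cur.take j).length = j := by simp [Nat.le_of_lt hjlen]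
        simp only [if_pos hjlen]
        rw [show j + 1 = (cur.take j).length + 1 by rw [hl], List.take_append]
        simp
      rw [htake, List.range'_succ]
      simp

lemma pv_pySetD_zero (xs : List Int) (v : Int) :
    PySem.List.pySetD xs 0 v = xs.set 0 v := by
  simpa using PySem.List.pySetD_natCast xs 0 v

lemma pv_setloop1 (v : Int → Int) (L : Nat) (h : 1 ≤ L) (cur : List Int) (hlen : cur.length = L) :
    (PySem.List.pyRange 1 (L : Int)).foldl (fun lmb pl => PySem.List.pySetD lmb pl (v pl)) cur
      = cur.take 1 ++ (List.range' 1 (L - 1)).map (fun k : Nat => v (k : Int)) := by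
  have h0 := pv_setloop v (L - 1) 1 cur (by omega)
  rw [show ((1 : Nat) : Int) = (1 : Int) from by norm_num] at h0
  rw [show (1 : Int) + (((L - 1 : Nat)) : Int) = (L : Int) from by omega] at h0
  exact h0

-- A's whole output
lemma pv_A_eq (ts : List (List Int)) (hpre : Pre_calculate_layer_max_branches_py ts) :
    calculate_layer_max_branches_py ts
      = (List.range' 0 (ts.headD []).length).map (pvLevel ts) := by
  obtain ⟨hne, h1, hall⟩ := hpre
  simp only [calculate_layer_max_branches_py]
  rw [← pv_level0 ts hne]
  rw [pv_pySetD_zero]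
  rw [pv_setloop1 _ (ts.headD []).length h1 _ (by simp only [List.length_set, List.length_replicate])]
  have htake : ((List.replicate (ts.headD []).length (0 : Int)).set 0 (pvLevel ts 0)).take 1
      = [pvLevel ts 0] := by
    obtain ⟨L', hL'⟩ : ∃ L', (ts.headD []).length = L' + 1 := ⟨(ts.headD []).length - 1, by omega⟩
    rw [hL']
    simp [List.replicate_succ]
  rw [htake]
  simp only [pv_A_level]
  have hr : List.range' 0 (ts.headD []).length = 0 :: List.range' 1 ((ts.headD []).length - 1) := by
    obtain ⟨L', hL'⟩ : ∃ L', (ts.headD []).length = L' + 1 := ⟨(ts.headD []).length - 1, by omega⟩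
    rw [hL']
    rw [List.range'_succ]
    simp
  rw [hr]
  simp only [List.map_cons, List.singleton_append]

-- B's whole output
lemma pv_B_eq (ts : List (List Int)) (hpre : Pre_calculate_layer_max_branches_py ts) :
    calculate_layer_max_branches_py_alt ts
      = (List.range' 0 (ts.headD []).length).map (pvLevel ts) := by
  obtain ⟨hne, hlen1, hall⟩ := hpre
  rw [pv_alt_eq, List.range_eq_range']
  apply pv_loop ts hne _ 0 _ _ (by simpa using hall)
  exact ⟨[[]], by simp, by
    intro p
    obtain ⟨x, tl, rfl⟩ := List.exists_cons_of_ne_nil hne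
    simp [eq_comm], by simp [pvGrp, List.filter_eq_self.mpr]⟩

-- ===== VERDICT (by name: the statement is the Claim_ definition above) =====
theorem calculate_layer_max_branches_py_spec : Claim_equal_calculate_layer_max_branches_py := by
  intro ts _ hpre
  unfold Spec_calculate_layer_max_branches_py
  rw [pv_A_eq ts hpre, pv_B_eq ts hpre]
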